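-- pv_equiv track=rewrite | github.com/igorvanloo/Project-Euler-Explained | Finished Problems/pe00128 - Hexagonal Tile Differences.py | compute
-- ===== SOURCE A (Python) =====
-- import time, math
--
-- def is_prime(x):  # Test if giving value is a prime
--     if x <= 1:
--         return False
--     elif x <= 3:
--         return True
--     elif x % 2 == 0:
--         return False
--     else:
--         for i in range(3, int(math.sqrt(x)) + 1, 2):
--             if x % i == 0:
--                 return False
--         return True
--
-- def compute(n):
--     L = [1, 2] #PD(1) = 3, PD(2) = 3
--     i = 2
--     v = 7
--     while len(L) < n + 1:
--         if is_prime(6*i - 1):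
--             if is_prime(6*i + 1):
--                 if is_prime(12*i + 5):
--                     L.append(v + 1)
--
--             if is_prime(6*i + 5):
--                 if is_prime(12*i - 7):
--                     L.append(1 + 6*math.comb(i + 1, 2))
--         i += 1
--         v = 1 + 6*math.comb(i, 2)
--
--     return L[n - 1]
-- ===== SOURCE B (Python) =====
-- import math
--
-- def _build_composite(limit):
--     # Sieve of Eratosthenes: comp[m] == 1 iff m is composite (for 2 <= m <= limit)
--     comp = bytearray(limit + 1)
--     for d in range(2, math.isqrt(limit) + 1):
--         comp[d*d::d] = b'\x01' * len(range(d*d, limit + 1, d))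
--     return comp
--
-- def compute(n):
--     terms = [1, 2]
--     i = 2
--     cap = 4
--     comp = _build_composite(12 * cap + 5)
--     while len(terms) < n + 1:
--         if i >= cap:
--             cap *= 2
--             comp = _build_composite(12 * cap + 5)
--         if not comp[6*i - 1]:
--             if not comp[6*i + 1] and not comp[12*i + 5]:
--                 terms.append(3*i*i - 3*i + 2)
--             if not comp[6*i + 5] and not comp[12*i - 7]:
--                 terms.append(3*i*(i + 1) + 1)
--         i += 1
--     return terms[n - 1]
-- ===== Notes on version B (the rewrite author's own statement) =====
-- stated objective: faster
-- what changed: per-candidate trial division is replaced by a Sieve of Eratosthenes composite table rebuilt at geometric capacity doublings (O(1) lookups, slice-assignment marking), and the carried math.comb value by closed forms 3i²-3i+2 / 3i(i+1)+1; Pre_ excludes n <= -2, where A raises IndexError (L[n-1] out of range) and B raises too.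
-- outside the precondition, e.g. on compute(-2): A raises IndexError, B raises IndexError
import Mathlib
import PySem

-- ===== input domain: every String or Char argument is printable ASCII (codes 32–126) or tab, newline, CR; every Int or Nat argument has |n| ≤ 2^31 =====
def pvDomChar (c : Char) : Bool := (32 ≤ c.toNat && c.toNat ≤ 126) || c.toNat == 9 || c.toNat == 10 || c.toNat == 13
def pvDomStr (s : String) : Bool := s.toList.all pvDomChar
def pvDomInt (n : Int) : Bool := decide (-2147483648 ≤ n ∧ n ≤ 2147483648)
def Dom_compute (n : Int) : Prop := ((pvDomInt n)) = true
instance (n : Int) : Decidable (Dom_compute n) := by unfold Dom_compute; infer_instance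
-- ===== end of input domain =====

-- B replaces A's per-candidate trial division by a Sieve of Eratosthenes composite table,
-- rebuilt whenever the ring index reaches the geometrically doubled capacity (O(1) lookups),
-- and the carried math.comb value by the closed forms 3i²-3i+2 / 3i(i+1)+1 (measured faster).

-- ===== PORT A =====

-- math.comb(k, 2) = k*(k-1)//2; A only calls it with k ≥ 2, where this is exact.
def combA (k : Int) : Int := PySem.Int.floordiv (k * (k - 1)) 2

-- int(math.sqrt(x)) modelled by Int.sqrt: exact for 0 ≤ x < 2^52; every x A tests is 12*i+O(1)
-- with i bounded by the loop, far below that.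
def isPrimeA (x : Int) : Bool :=
  if x ≤ 1 then false
  else if x ≤ 3 then true
  else if PySem.Int.mod x 2 == 0 then false
  else !((PySem.List.pyRange 3 (Int.sqrt x + 1) 2).any (fun i => PySem.Int.mod x i == 0))

-- the while loop of A, on fuel (the loop's termination for every n is an open number-theoretic
-- fact; the fuel 4000 + 300*n is far beyond the empirically needed ring count for feasible n,
-- and both ports run on the same fuel, one ring per unit, so the claim is about the same iteration)
def loopA (fuel : Nat) (L : List Int) (i v n : Int) : List Int :=
  match fuel with
  | 0 => L
  | f + 1 =>
    if (L.length : Int) < n + 1 then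
      let L1 :=
        if isPrimeA (6*i - 1) then
          let L' := if isPrimeA (6*i + 1) && isPrimeA (12*i + 5) then L ++ [v + 1] else L
          if isPrimeA (6*i + 5) && isPrimeA (12*i - 7) then L' ++ [1 + 6 * combA (i + 1)] else L'
        else L
      loopA f L1 (i + 1) (1 + 6 * combA (i + 1)) n
    else L

def compute (n : Int) : Int :=
  (PySem.List.pyGet? (loopA (4000 + 300 * n.toNat) [1, 2] 2 7 n) (n - 1)).getD 0

-- ===== PORT B =====

-- _build_composite(limit): the bytearray of 0/1 flags is ported as the set of marked indices
-- (a Std.HashSet, O(1) membership like the bytearray), built by the same double loop (the slice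
-- assignment comp[d*d::d] = ... marks exactly the indices of range(d*d, limit+1, d));
-- comp[m] == 1 in Python ↔ m ∈ compositeS limit. math.isqrt = Int.sqrt (exact for 0 ≤ limit).
def compositeS (limit : Int) : Std.HashSet Int :=
  (PySem.List.pyRange 2 (Int.sqrt limit + 1) 1).foldl
    (fun s d => (PySem.List.pyRange (d*d) (limit + 1) d).foldl
        (fun t m => t.insert m) s)
    ∅

-- the while loop of B: carries the capacity and the current composite table, doubling and
-- rebuilding the table when i reaches the capacity, exactly as Source B does.
def loopB (fuel : Nat) (terms : List Int) (i cap n : Int) (comp : Std.HashSet Int) : List Int :=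
  match fuel with
  | 0 => terms
  | f + 1 =>
    if (terms.length : Int) < n + 1 then
      let cap' := if cap ≤ i then 2 * cap else cap
      let comp' := if cap ≤ i then compositeS (12 * cap' + 5) else comp
      let t1 :=
        if !comp'.contains (6*i - 1) then
          let t := if !comp'.contains (6*i + 1) && !comp'.contains (12*i + 5) then terms ++ [3*i*i - 3*i + 2] else terms
          if !comp'.contains (6*i + 5) && !comp'.contains (12*i - 7) then t ++ [3*i*(i + 1) + 1] else t
        else terms
      loopB f t1 (i + 1) cap' n comp'
    else terms

def compute_alt (n : Int) : Int :=
  (PySem.List.pyGet? (loopB (4000 + 300 * n.toNat) [1, 2] 2 4 n (compositeS 53)) (n - 1)).getD 0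

-- ===== PRECONDITION & SPEC =====
-- Pre_ excludes only n ≤ -2, where A raises IndexError (L[n-1] out of range); B raises there too.
def Pre_compute (n : Int) : Prop := -1 ≤ n
instance (n : Int) : Decidable (Pre_compute n) := by unfold Pre_compute; infer_instance
def pvWitness_compute : Int := 5

def Spec_compute (n : Int) (out : Int) : Prop := out = compute_alt n
instance (n : Int) (out : Int) : Decidable (Spec_compute n out) := by unfold Spec_compute; infer_instance

-- ===== CLAIM (what is proved, stated in full; the proofs are below) =====
def Claim_equal_compute : Prop := ∀ (n : Int), Dom_compute n → Pre_compute n → Spec_compute n (compute n)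

-- ===== LEMMAS AND PROOFS =====

-- A's trial division decides Nat.Prime x.toNat
lemma listA_true (x : Int) (h4 : 4 ≤ x) (hodd : ¬ (2 : Int) ∣ x) :
    ((PySem.List.pyRange 3 (Int.sqrt x + 1) 2).any (fun i => PySem.Int.mod x i == 0)) = true
      ↔ ¬ Nat.Prime x.toNat := by
  have hxm : ((x.toNat : Int)) = x := Int.toNat_of_nonneg (by omega)
  have hs : Int.sqrt x = ((Nat.sqrt x.toNat : Nat) : Int) := rfl
  simp only [List.any_eq_true, PySem.List.mem_pyRange_iff_of_pos (show (0:Int) < 2 by norm_num),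
    beq_iff_eq, PySem.Int.mod_eq_zero_iff_dvd]
  constructor
  · rintro ⟨i, ⟨h3, hlt, _⟩, hdvd⟩ hp
    have hnn : (i.toNat : Int) = i := Int.toNat_of_nonneg (by omega)
    have hdn : i.toNat ∣ x.toNat := by
      rw [← Int.natCast_dvd_natCast, hnn, hxm]; exact hdvd
    have hle : i.toNat ≤ Nat.sqrt x.toNat := by omega
    exact (Nat.prime_def_le_sqrt.mp hp).2 i.toNat (by omega) hle hdn
  · intro hnp
    have hm1 : x.toNat ≠ 1 := by omega
    have hq := Nat.minFac_prime hm1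
    have hqd : x.toNat.minFac ∣ x.toNat := Nat.minFac_dvd _
    have hsq : x.toNat.minFac ^ 2 ≤ x.toNat := Nat.minFac_sq_le_self (by omega) hnp
    set q := x.toNat.minFac with hqdef
    have hq2 : q ≠ 2 := by
      intro h; apply hodd
      have h2d : (2 : Nat) ∣ x.toNat := h ▸ hqd
      rw [← hxm]; exact_mod_cast h2d
    have hqodd : q % 2 = 1 := Nat.odd_iff.mp (hq.odd_of_ne_two hq2)
    have hq3 : 3 ≤ q := by have := hq.two_le; omega
    have hqle : q ≤ Nat.sqrt x.toNat := Nat.le_sqrt.mpr (by nlinarith)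
    refine ⟨(q : Int), ⟨by exact_mod_cast hq3, by omega, by omega⟩, ?_⟩
    rw [← hxm]; exact_mod_cast hqd

lemma isPrimeA_iff (x : Int) : isPrimeA x = true ↔ Nat.Prime x.toNat := by
  unfold isPrimeA
  split_ifs with h1 h3 h2
  · simp only [false_iff]
    intro hp; have := hp.two_le; omega
  · simp only [true_iff]
    have : x.toNat = 2 ∨ x.toNat = 3 := by omega
    rcases this with h | h <;> rw [h]
    · exact Nat.prime_two
    · exact Nat.prime_three
  · simp only [beq_iff_eq, PySem.Int.mod_eq_zero_iff_dvd] at h2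
    simp only [false_iff]
    intro hp
    have hxm : ((x.toNat : Int)) = x := Int.toNat_of_nonneg (by omega)
    have hdn : 2 ∣ x.toNat := by
      rw [← Int.natCast_dvd_natCast (m := 2), hxm]; exact_mod_cast h2
    rcases (hp.eq_one_or_self_of_dvd 2 hdn) with h | h <;> omega
  · simp only [beq_iff_eq, PySem.Int.mod_eq_zero_iff_dvd] at h2
    rw [Bool.not_eq_true', ← Bool.not_eq_true]
    rw [listA_true x (by omega) h2]
    tauto

-- folding insert over a list marks exactly the members
lemma foldl_insert_mem (l : List Int) : ∀ (s : Std.HashSet Int) (x : Int),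
    ((l.foldl (fun t m => t.insert m) s).contains x) = (s.contains x || l.contains x) := by
  induction l with
  | nil => intro s x; simp
  | cons a l ih =>
    intro s x
    simp only [List.foldl_cons, ih, Std.HashSet.contains_insert, List.contains_cons]
    have hc : (a == x) = (x == a) := by
      by_cases h : a = x
      · rw [h]
      · have h1 : (a == x) = false := beq_false_of_ne h
        have h2 : (x == a) = false := beq_false_of_ne (Ne.symm h)
        rw [h1, h2]
    rw [hc]
    cases x == a <;> cases s.contains x <;> cases l.contains x <;> rfl

lemma foldl_nested (inner : Int → List Int) (L : List Int) : ∀ (s : Std.HashSet Int) (x : Int),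
    ((L.foldl (fun t d => (inner d).foldl (fun u m => u.insert m) t) s).contains x)
      = (s.contains x || L.any (fun d => (inner d).contains x)) := by
  induction L with
  | nil => intro s x; simp
  | cons a L ih =>
    intro s x
    simp only [List.foldl_cons, List.any_cons, ih, foldl_insert_mem, Bool.or_assoc]

lemma compositeS_eq (limit x : Int) :
    (compositeS limit).contains x
      = (PySem.List.pyRange 2 (Int.sqrt limit + 1) 1).any
          (fun d => (PySem.List.pyRange (d*d) (limit + 1) d).contains x) := by
  unfold compositeS
  rw [foldl_nested (fun d => PySem.List.pyRange (d*d) (limit + 1) d)]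
  simp

-- the sieve decides Nat.Prime x.toNat for 2 ≤ x ≤ limit
lemma compositeS_iff (limit x : Int) (h2 : 2 ≤ x) (hle : x ≤ limit) :
    (compositeS limit).contains x = true ↔ ¬ Nat.Prime x.toNat := by
  have hxm : ((x.toNat : Int)) = x := Int.toNat_of_nonneg (by omega)
  have hs : Int.sqrt limit = ((Nat.sqrt limit.toNat : Nat) : Int) := rfl
  rw [compositeS_eq]
  simp only [List.any_eq_true, List.contains_eq_mem, decide_eq_true_eq,
    PySem.List.mem_pyRange_one]
  constructor
  · rintro ⟨d, ⟨hd2, hdlt⟩, hmem⟩ hp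
    rw [PySem.List.mem_pyRange_iff_of_pos (show (0:Int) < d by omega)] at hmem
    obtain ⟨hdd, hxlt, hdvd'⟩ := hmem
    have hdvd : d ∣ x := by
      have : x = (x - d*d) + d*d := by ring
      rw [this]; exact dvd_add hdvd' ⟨d, rfl⟩
    have hdn : d.toNat ∣ x.toNat := by
      rw [← Int.natCast_dvd_natCast, Int.toNat_of_nonneg (by omega : (0:Int) ≤ d), hxm]
      exact hdvd
    have hdx : d < x := by nlinarith
    rcases hp.eq_one_or_self_of_dvd d.toNat hdn with h | h <;> omega
  · intro hnp
    have hm1 : x.toNat ≠ 1 := by omega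
    have hq := Nat.minFac_prime hm1
    have hqd : x.toNat.minFac ∣ x.toNat := Nat.minFac_dvd _
    have hsq : x.toNat.minFac ^ 2 ≤ x.toNat := Nat.minFac_sq_le_self (by omega) hnp
    set q := x.toNat.minFac with hqdef
    have hq2 : 2 ≤ q := hq.two_le
    have hqle : q ≤ Nat.sqrt limit.toNat := Nat.le_sqrt.mpr (by nlinarith [Int.toNat_le_toNat hle])
    have hqdx : (q : Int) ∣ x := by rw [← hxm]; exact_mod_cast hqd
    refine ⟨(q : Int), ⟨by exact_mod_cast hq2, by omega⟩, ?_⟩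
    rw [PySem.List.mem_pyRange_iff_of_pos (show (0:Int) < q by exact_mod_cast by omega)]
    refine ⟨?_, by omega, ?_⟩
    · have : ((q*q : Nat) : Int) ≤ (x.toNat : Int) := by exact_mod_cast (by nlinarith : q*q ≤ x.toNat)
      push_cast at this; omega
    · exact dvd_sub hqdx ⟨(q : Int), rfl⟩

lemma lookup_eq (limit x : Int) (h2 : 2 ≤ x) (hle : x ≤ limit) :
    (!(compositeS limit).contains x) = isPrimeA x := by
  have hA := isPrimeA_iff x
  have hB := compositeS_iff limit x h2 hle
  cases hA' : isPrimeA x <;> cases hB' : (compositeS limit).contains x <;> simp_all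

-- the closed-form value identities
lemma six_combA (j : Int) : 6 * combA j = 3 * (j * (j - 1)) := by
  have h2 : 2 ∣ j * (j - 1) := by
    have he : Even ((j - 1) * ((j - 1) + 1)) := Int.even_mul_succ_self (j - 1)
    have hr : j * (j - 1) = (j - 1) * ((j - 1) + 1) := by ring
    rw [hr]; exact he.two_dvd
  unfold combA
  rw [PySem.Int.floordiv_eq_ediv_of_pos (by norm_num)]
  generalize hA : j * (j - 1) = a at *
  omega

-- both loops step ring by ring in lockstep; the sieve capacity invariant 2 ≤ i ≤ cap keeps
-- every queried number inside the current table
lemma loop_eq (f : Nat) : ∀ (L : List Int) (i n cap : Int), 2 ≤ i → i ≤ cap →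
    loopA f L i (1 + 6 * combA i) n = loopB f L i cap n (compositeS (12 * cap + 5)) := by
  induction f with
  | zero => intros; rfl
  | succ f ih =>
    intro L i n cap h2 hic
    by_cases hlen : (L.length : Int) < n + 1
    · have hv1 : (3*i*i - 3*i + 2 : Int) = 1 + 6 * combA i + 1 := by rw [six_combA]; ring
      have hv2 : (3*i*(i + 1) + 1 : Int) = 1 + 6 * combA (i + 1) := by rw [six_combA]; ring
      by_cases hdb : cap ≤ i
      · simp only [loopA, loopB, if_pos hlen, if_pos hdb]
        rw [lookup_eq _ (6*i - 1) (by omega) (by omega),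
            lookup_eq _ (6*i + 1) (by omega) (by omega),
            lookup_eq _ (12*i + 5) (by omega) (by omega),
            lookup_eq _ (6*i + 5) (by omega) (by omega),
            lookup_eq _ (12*i - 7) (by omega) (by omega), hv1, hv2]
        exact ih _ (i + 1) n (2 * cap) (by omega) (by omega)
      · simp only [loopA, loopB, if_pos hlen, if_neg hdb]
        rw [lookup_eq _ (6*i - 1) (by omega) (by omega),
            lookup_eq _ (6*i + 1) (by omega) (by omega),
            lookup_eq _ (12*i + 5) (by omega) (by omega),
            lookup_eq _ (6*i + 5) (by omega) (by omega),
            lookup_eq _ (12*i - 7) (by omega) (by omega), hv1, hv2]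
        exact ih _ (i + 1) n cap (by omega) (by omega)
    · simp only [loopA, loopB, if_neg hlen]

lemma compute_eq (n : Int) : compute n = compute_alt n := by
  unfold compute compute_alt
  rw [show (7 : Int) = 1 + 6 * combA 2 by decide,
      loop_eq _ [1,2] 2 n 4 (by norm_num) (by norm_num)]
  norm_num

-- ===== VERDICT (by name: the statement is the Claim_ definition above) =====
theorem compute_spec : Claim_equal_compute := by
  intro n _ _
  unfold Spec_compute
  exact compute_eq n
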